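-- pv_equiv track=rewrite | github.com/seanwhill/InterviewPrep | leetcode/nails.py | solution
-- ===== SOURCE A (Python) =====
-- def solution(A, K):
--     n = len(A)
--     best = 0
--     count = 1
--     for i in range(n - K - 1):
--         if (A[i] == A[i + 1]):
--             count = count + 1
--         else:
--             count = 1
--         best = max(best, count)
--     result = min(max(best + K, K + 1), n)
--     return result
-- ===== SOURCE B (Python) =====
-- def solution(A, K):
--     n = len(A)
--     P = A[:max(n - K, 0)]
--     m = len(P)
--     cuts = [0] + [i for i in range(1, m) if P[i] != P[i - 1]] + [m]
--     best = max(b - a for a, b in zip(cuts, cuts[1:]))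
--     return min(max(best + K, K + 1), n)
-- ===== Notes on version B (the rewrite author's own statement) =====
-- stated objective: alternative
-- what changed: Replaces the running best/count accumulator loop over indices of A with a two-phase shape: slice the prefix, list the change points (cut positions), and take the max gap between consecutive cuts; the closed-form clamp is kept.
import Mathlib
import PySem

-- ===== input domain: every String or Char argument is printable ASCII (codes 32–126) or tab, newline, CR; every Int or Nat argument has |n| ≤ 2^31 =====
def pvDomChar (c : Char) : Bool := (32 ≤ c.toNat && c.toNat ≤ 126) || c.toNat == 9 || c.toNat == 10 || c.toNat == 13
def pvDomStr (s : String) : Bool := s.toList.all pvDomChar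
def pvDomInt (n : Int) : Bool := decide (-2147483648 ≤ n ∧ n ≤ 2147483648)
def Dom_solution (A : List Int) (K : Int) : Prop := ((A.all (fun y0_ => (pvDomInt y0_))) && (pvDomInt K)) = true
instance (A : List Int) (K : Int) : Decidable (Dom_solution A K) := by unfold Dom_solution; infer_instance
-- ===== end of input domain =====

-- B replaces A's running best/count loop by a two-phase shape (prefix slice, change-point cuts, max gap); same asymptotic cost.


-- ===== PORT A =====
def solution (A : List Int) (K : Int) : Int :=
  let n : Int := A.length
  let bc := (PySem.List.pyRange 0 (n - K - 1) 1).foldl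
    (fun (st : Int × Int) i =>
      let count := if PySem.List.pyGetD A i 0 = PySem.List.pyGetD A (i + 1) 0 then st.2 + 1 else 1
      (max st.1 count, count)) (0, 1)
  min (max (bc.1 + K) (K + 1)) n

-- ===== PORT B =====
def solution_alt (A : List Int) (K : Int) : Int :=
  let n : Int := A.length
  let P := PySem.List.slice A none (some (max (n - K) 0))
  let m : Int := P.length
  let cuts : List Int :=
    [0] ++ (PySem.List.pyRange 1 m 1).filter
      (fun i => decide (PySem.List.pyGetD P i 0 ≠ PySem.List.pyGetD P (i - 1) 0)) ++ [m]
  let best : Int := (PySem.List.max? ((cuts.zip cuts.tail).map (fun p => p.2 - p.1)) (fun x => x)).getD 0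
  min (max (best + K) (K + 1)) n

-- ===== PRECONDITION & SPEC =====
-- Pre_ admits exactly the inputs on which A returns: for K < 0 the loop reads A[n-K-1] past the end
-- and raises IndexError, except the single shape A = [], K = -1 where the loop body is never entered.
def Pre_solution (A : List Int) (K : Int) : Prop := 0 ≤ K ∨ (A = [] ∧ K = -1)
instance (A : List Int) (K : Int) : Decidable (Pre_solution A K) := by unfold Pre_solution; infer_instance
def pvWitness_solution : List Int × Int := ([1, 1, 2, 2, 2, 3], 1)

def Spec_solution (A : List Int) (K : Int) (out : Int) : Prop := out = solution_alt A K
instance (A : List Int) (K : Int) (out : Int) : Decidable (Spec_solution A K out) := by unfold Spec_solution; infer_instance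

-- ===== CLAIM (what is proved, stated in full; the proofs are below) =====
def Claim_equal_solution : Prop := ∀ (A : List Int) (K : Int), Dom_solution A K → Pre_solution A K → Spec_solution A K (solution A K)

-- ===== LEMMAS AND PROOFS =====

-- running max of run lengths, seeded with current run length r ending at prev
def gB : Int → Int → List Int → Int
  | _, r, [] => r
  | prev, r, x :: xs => if x = prev then gB x (r + 1) xs else max r (gB x 1 xs)

-- change positions: indices i (starting at i0) where the element differs from its predecessor
def chg : Int → Int → List Int → List Int
  | _, _, [] => []
  | prev, i, x :: xs => (if x ≠ prev then [i] else []) ++ chg x (i + 1) xs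

-- A's loop body as a fold step over value pairs
def stepA (st : Int × Int) (uv : Int × Int) : Int × Int :=
  let count := if uv.1 = uv.2 then st.2 + 1 else 1
  (max st.1 count, count)

-- B's max-of-adjacent-diffs
def diffsMax (cuts : List Int) : Int :=
  (PySem.List.max? ((cuts.zip cuts.tail).map (fun p => p.2 - p.1)) (fun x => x)).getD 0

lemma gB_cons_eq (prev r x : Int) (xs : List Int) (h : x = prev) :
    gB prev r (x :: xs) = gB x (r + 1) xs := by simp [gB, h]

lemma gB_cons_ne (prev r x : Int) (xs : List Int) (h : x ≠ prev) :
    gB prev r (x :: xs) = max r (gB x 1 xs) := by simp [gB, h]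

lemma gB_ge (xs : List Int) : ∀ prev r, r ≤ gB prev r xs := by
  induction xs with
  | nil => intro prev r; simp [gB]
  | cons x xs ih =>
    intro prev r
    simp only [gB]
    split
    · exact le_trans (by omega) (ih x (r + 1))
    · exact le_max_left _ _

lemma pyRange_one_nil {a b : Int} (h : b ≤ a) : PySem.List.pyRange a b 1 = [] :=
  List.eq_nil_of_length_eq_zero (by rw [PySem.List.length_pyRange_one]; omega)

lemma diffsMax_cons_cons (a b : Int) (t : List Int) (hab : a ≤ b) :
    diffsMax (a :: b :: t) = max (b - a) (diffsMax (b :: t)) := by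
  cases t with
  | nil => simp [diffsMax, PySem.List.max?]; omega
  | cons c t' =>
    simp only [diffsMax, List.tail_cons, List.zip_cons_cons, List.map_cons,
      PySem.List.max?_id_cons, Option.getD_some]
    rw [List.foldl_cons]
    exact List.foldl_assoc

lemma B1 (xs : List Int) : ∀ (prev c i : Int), c ≤ i - 1 →
    diffsMax (c :: (chg prev i xs ++ [i + xs.length])) = gB prev (i - c) xs := by
  induction xs with
  | nil =>
    intro prev c i _
    simp [diffsMax, chg, gB, PySem.List.max?]
  | cons x xs ih =>
    intro prev c i hci
    by_cases hxp : x = prev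
    · have h1 : chg prev i (x :: xs) = chg x (i + 1) xs := by simp [chg, hxp]
      have h2 : i + ((x :: xs).length : Int) = (i + 1) + (xs.length : Int) := by
        simp; omega
      rw [h1, h2, ih x c (i + 1) (by omega)]
      rw [gB_cons_eq _ _ _ _ hxp]
      have h3 : i + 1 - c = i - c + 1 := by omega
      rw [h3]
    · have h1 : chg prev i (x :: xs) = i :: chg x (i + 1) xs := by simp [chg, hxp]
      have h2 : i + ((x :: xs).length : Int) = (i + 1) + (xs.length : Int) := by
        simp; omega
      rw [h1, h2, List.cons_append,
        diffsMax_cons_cons c i _ (by omega), ih x i (i + 1) (by omega),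
        gB_cons_ne _ _ _ _ hxp]
      simp

lemma A2 (xs : List Int) : ∀ (prev b c : Int), c ≤ b →
    (((prev :: xs).zip xs).foldl stepA (b, c)).1 = max b (gB prev c xs) := by
  induction xs with
  | nil => intro prev b c hcb; simp [gB]; omega
  | cons x rest ih =>
    intro prev b c hcb
    simp only [List.zip_cons_cons, List.foldl_cons]
    by_cases hpx : prev = x
    · subst hpx
      have hst : stepA (b, c) (prev, prev) = (max b (c + 1), c + 1) := by simp [stepA]
      rw [hst, ih prev (max b (c + 1)) (c + 1) (le_max_right _ _), gB_cons_eq _ _ _ _ rfl]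
      have hg := gB_ge rest prev (c + 1)
      omega
    · have hst : stepA (b, c) (prev, x) = (max b 1, 1) := by simp [stepA, hpx]
      rw [hst, ih x (max b 1) 1 (le_max_right _ _), gB_cons_ne _ _ _ _ (Ne.symm hpx)]
      have hg := gB_ge rest x 1
      omega

-- index-based filter of B equals the structural change list
lemma lemB (P : List Int) : ∀ (xs : List Int) (s : Nat), P.drop (s + 1) = xs → s + 1 ≤ P.length →
    (PySem.List.pyRange ((s : Int) + 1) (P.length : Int) 1).filter
      (fun i => decide (PySem.List.pyGetD P i 0 ≠ PySem.List.pyGetD P (i - 1) 0))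
    = chg (PySem.List.pyGetD P (s : Int) 0) ((s : Int) + 1) xs := by
  intro xs
  induction xs with
  | nil =>
    intro s hdrop hs
    have hlen : P.length = s + 1 := by
      have := congrArg List.length hdrop; simp at this; omega
    rw [hlen, pyRange_one_nil (by push_cast; omega)]
    simp [chg]
  | cons x rest ih =>
    intro s hdrop hs
    have hlt : s + 1 < P.length := by
      have := congrArg List.length hdrop; simp at this; omega
    have h0 : P[s + 1]? = some x := by
      have h := congrArg (fun l => l[0]?) hdrop
      simpa [List.getElem?_drop] using h
    have hx : PySem.List.pyGetD P ((s : Int) + 1) 0 = x := by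
      have h1 : ((s : Int) + 1) = ((s + 1 : Nat) : Int) := by push_cast; ring
      rw [h1, PySem.List.pyGetD_natCast, List.getD_eq_getElem?_getD, h0]
      rfl
    have hprev : PySem.List.pyGetD P ((s : Int)) 0 = P[s]?.getD 0 := by
      rw [PySem.List.pyGetD_natCast, List.getD_eq_getElem?_getD]
    have hcons : PySem.List.pyRange ((s : Int) + 1) (P.length : Int) 1
        = ((s : Int) + 1) :: PySem.List.pyRange ((s : Int) + 1 + 1) (P.length : Int) 1 := by
      exact PySem.List.pyRange_one_cons (by push_cast; omega)
    have hdrop' : P.drop (s + 1 + 1) = rest := by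
      have h := congrArg List.tail hdrop
      rw [List.tail_drop] at h
      simpa using h
    have ihx := ih (s + 1) hdrop' (by omega)
    push_cast at ihx
    rw [hcons, List.filter_cons, ihx]
    simp only [add_sub_cancel_right, hx, hprev]
    by_cases hne : x = P[s]?.getD 0
    · simp [chg, hne]
    · simp [chg, hne]

-- index pairs of A's loop are the adjacent pairs of the prefix P
lemma pairs_eq (A : List Int) (m : Nat) (hm : 1 ≤ m) (hmn : m ≤ A.length) :
    (PySem.List.pyRange 0 ((m : Int) - 1) 1).map
      (fun i => (PySem.List.pyGetD A i 0, PySem.List.pyGetD A (i + 1) 0))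
    = (A.take m).zip (A.take m).tail := by
  apply List.ext_getElem
  · simp [PySem.List.length_pyRange_one]
    omega
  · intro k hk1 hk2
    have hklen : k < m - 1 := by
      simp [PySem.List.length_pyRange_one] at hk1; omega
    have hgetA : ∀ (j : Nat) (hj : j < m), PySem.List.pyGetD A (j : Int) 0 = (A.take m)[j]'(by simp; omega) := by
      intro j hj
      rw [PySem.List.pyGetD_natCast, List.getD_eq_getElem?_getD,
        List.getElem?_eq_getElem (by omega)]
      simp [List.getElem_take]
    simp only [List.getElem_map, PySem.List.getElem_pyRange_one]
    have hkz1 : k < (A.take m).tail.length := by simp; omega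
    have hkz2 : k + 1 < (A.take m).length := by simp; omega
    have htail : (A.take m).tail[k]'hkz1 = (A.take m)[k + 1]'hkz2 := by
      simp [List.getElem_tail]
    rw [List.getElem_zip, htail]
    have e1 : (0 : Int) + (k : Int) = ((k : Nat) : Int) := by push_cast; ring
    rw [e1, hgetA k (by omega)]
    have e2 : ((k : Nat) : Int) + 1 = (((k + 1) : Nat) : Int) := by push_cast; ring
    rw [e2, hgetA (k + 1) (by omega)]

lemma solution_eq_alt (A : List Int) (K : Int) (hK : 0 ≤ K) : solution A K = solution_alt A K := by
  simp only [solution, solution_alt]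
  set n : Int := (A.length : Int) with hn
  have hn0 : 0 ≤ n := by positivity
  rw [PySem.List.slice_to A (by omega : (0:Int) ≤ max (n - K) 0)]
  set m : Nat := (max (n - K) 0).toNat with hm
  have hmn : m ≤ A.length := by omega
  by_cases hm1 : m = 0
  · have h1 : PySem.List.pyRange 0 (n - K - 1) 1 = [] := by
      rw [PySem.List.pyRange_zero]
      simp [Int.toNat_of_nonpos (by omega : n - K - 1 ≤ 0)]
    rw [h1, hm1]
    simp [pyRange_one_nil, PySem.List.max?_id_cons]
  · rcases hP : A.take m with _ | ⟨p, tl⟩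
    · exfalso; have := congrArg List.length hP; simp [hmn] at this; omega
    have hmlen : m = 1 + tl.length := by
      have := congrArg List.length hP; simp [hmn] at this; omega
    have hB : (PySem.List.pyRange 1 (((p :: tl).length : Int)) 1).filter
        (fun i => decide (PySem.List.pyGetD (p :: tl) i 0 ≠ PySem.List.pyGetD (p :: tl) (i - 1) 0))
        = chg p 1 tl := by
      have := lemB (p :: tl) tl 0 (by simp) (by simp)
      simpa using this
    have hBbest : (PySem.List.max?
        ((([(0:Int)] ++ chg p 1 tl ++ [(((p :: tl).length : Int))]).zip
            ([(0:Int)] ++ chg p 1 tl ++ [(((p :: tl).length : Int))]).tail).map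
          (fun q => q.2 - q.1))
        (fun x => x)).getD 0 = gB p 1 tl := by
      rw [show (((p :: tl).length : Int)) = 1 + (tl.length : Int) by simp; omega]
      have hx := B1 tl p 0 1 (by omega)
      simpa [diffsMax] using hx
    have hrange : n - K - 1 = (m : Int) - 1 := by omega
    have hA : ((PySem.List.pyRange 0 ((m : Int) - 1) 1).foldl
        (fun (st : Int × Int) i =>
          let count := if PySem.List.pyGetD A i 0 = PySem.List.pyGetD A (i + 1) 0 then st.2 + 1 else 1
          (max st.1 count, count)) (0, 1)).1
        = (((p :: tl).zip tl).foldl stepA (0, 1)).1 := by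
      have hfold : ((PySem.List.pyRange 0 ((m : Int) - 1) 1).foldl
          (fun (st : Int × Int) i =>
            let count := if PySem.List.pyGetD A i 0 = PySem.List.pyGetD A (i + 1) 0 then st.2 + 1 else 1
            (max st.1 count, count)) (0, 1))
          = (((PySem.List.pyRange 0 ((m : Int) - 1) 1).map
              (fun i => (PySem.List.pyGetD A i 0, PySem.List.pyGetD A (i + 1) 0))).foldl stepA (0, 1)) := by
        rw [List.foldl_map]
        rfl
      rw [hfold, pairs_eq A m (by omega) hmn, hP]
      simp
    rw [hrange, hB, hA, hBbest]
    cases tl with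
    | nil =>
      simp [stepA, gB]
      omega
    | cons x rest =>
      have hstep : stepA ((0 : Int), (1 : Int)) (p, x) = (max 0 (if p = x then 2 else 1), if p = x then 2 else 1) := by
        by_cases hpx : p = x <;> simp [stepA, hpx]
      simp only [List.zip_cons_cons, List.foldl_cons, hstep]
      by_cases hpx : p = x
      · subst hpx
        rw [if_pos rfl, A2 rest p (max 0 2) 2 (by omega), gB_cons_eq p 1 p rest rfl]
        have hg := gB_ge rest p 2
        norm_num
        omega
      · rw [if_neg hpx, A2 rest x (max 0 1) 1 (by omega), gB_cons_ne p 1 x rest (Ne.symm hpx)]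
        have hg := gB_ge rest x 1
        omega

-- ===== VERDICT (by name: the statement is the Claim_ definition above) =====
theorem solution_spec : Claim_equal_solution := by
  intro A K _ hpre
  unfold Spec_solution
  rcases hpre with hK | ⟨hA, hK⟩
  · exact solution_eq_alt A K hK
  · subst hA; subst hK; decide
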